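-- pv_equiv track=rewrite | github.com/karstendick/rhymes | rhymes-py/rhymes.py | last_syllable
-- ===== SOURCE A (Python) =====
-- vowels = ['AA','AE','AH','AO','AW','AY',
--           'EH','ER','EY',
--           'IH','IY',
--           'OW','OY',
--           'UH','UW']
--
-- def last_syllable(word):
--     syllable = []
--     for p in word[::-1]:
--         syllable.append(p)
--         stripped_p = p.translate(dict((ord(d), None) for d in ['0','1','2']))
--         if stripped_p in vowels:
--             break
--     return syllable[::-1]
-- ===== SOURCE B (Python) =====
-- vowels = ['AA','AE','AH','AO','AW','AY',
--           'EH','ER','EY',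
--           'IH','IY',
--           'OW','OY',
--           'UH','UW']
--
-- def last_syllable(word):
--     # Forward single pass: remember the index of the LAST vowel phoneme,
--     # then return the suffix from that index (whole word if none).
--     idx = None
--     for i, p in enumerate(word):
--         stripped_p = ''.join(c for c in p if c not in '012')
--         if stripped_p in vowels:
--             idx = i
--     if idx is None:
--         return list(word)
--     return list(word[idx:])
-- ===== Notes on version B (the rewrite author's own statement) =====
-- stated objective: alternative
-- what changed: Replaces the backward scan-with-break that accumulates and re-reverses with a forward enumerate pass that records the last vowel's index and returns one slice.
import Mathlib
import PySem

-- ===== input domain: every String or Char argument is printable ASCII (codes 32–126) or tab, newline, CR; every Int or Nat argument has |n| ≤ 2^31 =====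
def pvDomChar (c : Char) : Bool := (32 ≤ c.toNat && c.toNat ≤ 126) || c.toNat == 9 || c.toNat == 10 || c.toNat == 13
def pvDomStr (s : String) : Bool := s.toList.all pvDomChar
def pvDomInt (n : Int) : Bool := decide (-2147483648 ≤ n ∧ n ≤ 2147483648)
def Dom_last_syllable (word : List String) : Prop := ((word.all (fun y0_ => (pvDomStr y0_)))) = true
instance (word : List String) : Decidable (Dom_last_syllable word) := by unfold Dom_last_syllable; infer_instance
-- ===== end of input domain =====

-- B rewrites A's backward scan-with-break (accumulate then re-reverse) as a forward
-- enumerate pass recording the last vowel's index, returning one slice (objective: alternative).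

-- shared module constant
def pvVowels : List String :=
  ["AA","AE","AH","AO","AW","AY","EH","ER","EY","IH","IY","OW","OY","UH","UW"]

-- A: p.translate({ord('0'):None, ord('1'):None, ord('2'):None}) deletes every '0','1','2';
-- B: ''.join(c for c in p if c not in '012') does the same; exact on all strings,
-- ported as a character filter.
def pvStrip012 (p : String) : String :=
  String.ofList (p.toList.filter (fun c => ¬ (c = '0' ∨ c = '1' ∨ c = '2')))

-- ===== PORT A =====
-- the for-loop over word[::-1] with append and break
def pvLoopA : List String → List String → List String
  | [], syllable => syllable
  | p :: rest, syllable =>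
      let syllable := syllable ++ [p]
      if pvStrip012 p ∈ pvVowels then syllable else pvLoopA rest syllable

def last_syllable (word : List String) : List String :=
  (pvLoopA word.reverse []).reverse

-- ===== PORT B =====
def last_syllable_alt (word : List String) : List String :=
  -- forward pass over enumerate(word), overwriting idx at each vowel
  let idx : Option Int :=
    (PySem.List.enumerate word).foldl
      (fun acc ip => if pvStrip012 ip.2 ∈ pvVowels then some ip.1 else acc) none
  match idx with
  | none => word
  | some i => PySem.List.slice word (some i) none

-- ===== PRECONDITION & SPEC =====
def Spec_last_syllable (word : List String) (out : List String) : Prop := out = last_syllable_alt word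
instance (word : List String) (out : List String) : Decidable (Spec_last_syllable word out) := by unfold Spec_last_syllable; infer_instance

-- ===== CLAIM (what is proved, stated in full; the proofs are below) =====
def Claim_equal_last_syllable : Prop := ∀ (word : List String), Dom_last_syllable word → Spec_last_syllable word (last_syllable word)

-- ===== LEMMAS AND PROOFS =====

abbrev pvIsVowel (p : String) : Prop := pvStrip012 p ∈ pvVowels

-- A's loop unfolds to: accumulator ++ (prefix up to and including the first vowel)
def pvTakeA : List String → List String
  | [] => []
  | p :: rest => if pvIsVowel p then [p] else p :: pvTakeA rest

theorem pvLoopA_eq (rev syl : List String) :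
    pvLoopA rev syl = syl ++ pvTakeA rev := by
  induction rev generalizing syl with
  | nil => simp [pvLoopA, pvTakeA]
  | cons p rest ih =>
      simp only [pvLoopA, pvTakeA, pvIsVowel]
      split_ifs with h
      · simp
      · rw [ih]; simp

theorem pvTakeA_append_not (l m : List String) (h : ∀ q ∈ l, ¬ pvIsVowel q) :
    pvTakeA (l ++ m) = l ++ pvTakeA m := by
  induction l with
  | nil => simp
  | cons a t ih =>
      have ha := h a (by simp)
      simp only [List.cons_append, pvTakeA, if_neg ha]
      rw [ih (fun q hq => h q (by simp [hq]))]

theorem pvTakeA_append_vowel (l m : List String) (h : ∃ q ∈ l, pvIsVowel q) :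
    pvTakeA (l ++ m) = pvTakeA l := by
  induction l with
  | nil => simp at h
  | cons a t ih =>
      by_cases ha : pvIsVowel a
      · simp [pvTakeA, ha]
      · obtain ⟨q, hq, hqv⟩ := h
        have hq' : q ∈ t := by
          rcases List.mem_cons.mp hq with rfl | h'
          · exact absurd hqv ha
          · exact h'
        simp only [List.cons_append, pvTakeA, if_neg ha]
        rw [ih ⟨q, hq', hqv⟩]

-- B's fold over enumerate with offset s and running accumulator
def pvLastIdx (s : Int) (xs : List String) (acc : Option Int) : Option Int :=
  (PySem.List.enumerate xs s).foldl
    (fun acc ip => if pvStrip012 ip.2 ∈ pvVowels then some ip.1 else acc) acc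

theorem pvLastIdx_cons (s : Int) (p : String) (rest : List String) (acc : Option Int) :
    pvLastIdx s (p :: rest) acc
      = pvLastIdx (s+1) rest (if pvIsVowel p then some s else acc) := by
  simp only [pvLastIdx, PySem.List.enumerate_cons, List.foldl_cons, pvIsVowel]

-- key characterisation: either no vowel anywhere (fold returns the accumulator),
-- or the fold returns s + (index of the LAST vowel) and A's result is the drop there
theorem pvLastIdx_spec (word : List String) (s : Int) (acc : Option Int) :
    ((∀ k : Nat, (h : k < word.length) → ¬ (fun q => pvStrip012 q ∈ pvVowels) (word[k]'h)) ∧ pvLastIdx s word acc = acc)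
    ∨ (∃ k : Nat, ∃ h : k < word.length, (fun q => pvStrip012 q ∈ pvVowels) (word[k]'h)
         ∧ pvLastIdx s word acc = some (s + k)
         ∧ (pvTakeA word.reverse).reverse = word.drop k) := by
  induction word generalizing s acc with
  | nil =>
      left
      refine ⟨?_, ?_⟩
      · intro k hk; simp at hk
      · simp [pvLastIdx, PySem.List.enumerate_nil]
  | cons p rest ih =>
      rw [pvLastIdx_cons]
      rcases ih (s+1) (if pvIsVowel p then some s else acc) with ⟨hnone, heq⟩ | ⟨k, hk, hv, heq, hdrop⟩
      · -- no vowel in rest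
        by_cases hp : pvIsVowel p
        · right
          refine ⟨0, by simp, by simpa using hp, ?_, ?_⟩
          · rw [heq, if_pos hp]; simp
          · have hall : ∀ q ∈ rest.reverse, ¬ pvIsVowel q := by
              intro q hq
              rw [List.mem_reverse] at hq
              obtain ⟨j, hj, rfl⟩ := List.mem_iff_getElem.mp hq
              exact hnone j hj
            rw [List.reverse_cons, pvTakeA_append_not _ _ hall]
            simp [pvTakeA, hp]
        · left
          refine ⟨?_, by rw [heq, if_neg hp]⟩
          intro k hk
          rcases k with _ | k
          · simpa using hp
          · simp only [List.getElem_cons_succ]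
            exact hnone k (by simpa using hk)
      · -- last vowel in rest at index k
        right
        have hvow : ∃ q ∈ rest.reverse, pvIsVowel q :=
          ⟨rest[k], List.mem_reverse.mpr (List.getElem_mem hk), hv⟩
        refine ⟨k+1, by simpa using Nat.succ_lt_succ hk, by simpa using hv, ?_, ?_⟩
        · rw [heq]; congr 1; push_cast; ring
        · rw [List.reverse_cons, pvTakeA_append_vowel _ _ hvow, hdrop]
          simp

theorem last_syllable_eq_takeA (word : List String) :
    last_syllable word = (pvTakeA word.reverse).reverse := by
  simp [last_syllable, pvLoopA_eq]

-- ===== VERDICT (by name: the statement is the Claim_ definition above) =====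
theorem last_syllable_spec : Claim_equal_last_syllable := by
  intro word _
  unfold Spec_last_syllable last_syllable_alt
  rw [last_syllable_eq_takeA]
  rcases pvLastIdx_spec word 0 none with ⟨hnone, heq⟩ | ⟨k, hk, _, heq, hdrop⟩
  · rw [show (PySem.List.enumerate word).foldl
          (fun acc ip => if pvStrip012 ip.2 ∈ pvVowels then some ip.1 else acc) none
        = none from heq]
    have hall : ∀ q ∈ word.reverse, ¬ pvIsVowel q := by
      intro q hq
      rw [List.mem_reverse] at hq
      obtain ⟨j, hj, rfl⟩ := List.mem_iff_getElem.mp hq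
      exact hnone j hj
    have := pvTakeA_append_not word.reverse [] hall
    simp only [List.append_nil] at this
    rw [this, pvTakeA]
    simp
  · have heq' : pvLastIdx 0 word none = some ((k : Int)) := by rw [heq]; simp
    rw [show (PySem.List.enumerate word).foldl
          (fun acc ip => if pvStrip012 ip.2 ∈ pvVowels then some ip.1 else acc) none
        = some ((k : Int)) from heq']
    rw [hdrop]
    exact (PySem.List.slice_from_natCast word k).symm
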